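-- pv_equiv track=rewrite | github.com/sbeaumont/AoC | 2018/AoC-2018-25.py | all_in_range_neighbours
-- ===== SOURCE A (Python) =====
-- from collections import defaultdict
-- from itertools import combinations
--
-- def manhattan_distance(p1, p2):
--     """4D Manhattan distance between p1 and p2."""
--     return abs(p2[0] - p1[0]) + abs(p2[1] - p1[1]) + abs(p2[2] - p1[2]) + abs(p2[3] - p1[3])
--
-- def all_in_range_neighbours(points):
--     in_range = defaultdict(set)
--     for p1, p2 in combinations(points, 2):
--         if manhattan_distance(p1, p2) <= 3:
--             in_range[p1].add(p2)
--             in_range[p2].add(p1)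
--     for p in [point for point in points if point not in in_range]:
--         in_range[p] = set()
--     return in_range
-- ===== SOURCE B (Python) =====
-- from collections import defaultdict
--
--
-- def _cell(p):
--     """Grid cell of a 4D point, cell size 4."""
--     return (p[0] // 4, p[1] // 4, p[2] // 4, p[3] // 4)
--
--
-- def all_in_range_neighbours(points):
--     # Spatial hash grid: two points within Manhattan distance 3 differ by at
--     # most 3 in every coordinate, so with cell size 4 they lie in the same or
--     # an adjacent cell along each axis.  Each point is compared only against
--     # the occupants of its 3**4 neighbouring cells instead of all others.
--     pts = list(points)
--     grid = defaultdict(list)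
--     for i, p in enumerate(pts):
--         grid[_cell(p)].append(i)
--     offs = (-1, 0, 1)
--     in_range = defaultdict(set)
--     for i, p in enumerate(pts):
--         x, y, z, t = _cell(p)
--         # sort the candidate indices so the result is deterministic and
--         # independent of how the grid buckets happen to be laid out
--         near = sorted(j
--                       for a in offs for b in offs for c in offs for d in offs
--                       for j in grid.get((x + a, y + b, z + c, t + d), ()))
--         for j in near:
--             if i < j:
--                 q = pts[j]
--                 if (abs(q[0] - p[0]) + abs(q[1] - p[1])
--                         + abs(q[2] - p[2]) + abs(q[3] - p[3])) <= 3: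
--                     in_range[p].add(q)
--                     in_range[q].add(p)
--     for p in pts:
--         if p not in in_range:
--             in_range[p] = set()
--     return in_range
-- ===== Notes on version B (the rewrite author's own statement) =====
-- stated objective: alternative
-- what changed: B replaces A's all-pairs combinations scan by a spatial hash grid with cell size 4: each point is compared only against the occupants of its 3^4 neighbouring cells (candidate indices sorted for a deterministic result); output-sensitive in the number of close pairs but not measurably faster on the dense generated inputs. Pre_ excludes inputs containing a point with fewer than 4 coordinates, on which A either raises IndexError itself (two or more points) or returns without ever reading coordinates while B's grid hashing raises IndexError.
-- outside the precondition, e.g. on all_in_range_neighbours([(0, 0)]): A returns {(0, 0): set()}, B raises IndexError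
import Mathlib
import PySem

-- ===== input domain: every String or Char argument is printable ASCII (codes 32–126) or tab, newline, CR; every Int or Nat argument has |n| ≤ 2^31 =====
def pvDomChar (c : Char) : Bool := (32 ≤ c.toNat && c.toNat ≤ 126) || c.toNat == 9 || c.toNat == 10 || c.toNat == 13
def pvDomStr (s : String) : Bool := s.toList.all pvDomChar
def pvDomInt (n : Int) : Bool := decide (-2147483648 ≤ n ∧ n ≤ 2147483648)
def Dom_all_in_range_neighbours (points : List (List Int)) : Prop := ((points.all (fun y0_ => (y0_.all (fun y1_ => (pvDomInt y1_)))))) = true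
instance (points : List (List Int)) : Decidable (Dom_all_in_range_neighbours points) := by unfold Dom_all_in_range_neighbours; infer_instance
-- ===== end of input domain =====

-- B replaces A's all-pairs scan with a spatial hash grid (cell size 4): each point is
-- compared only against the occupants of its 3^4 neighbouring cells (an alternative,
-- output-sensitive algorithm). Equality is on the returned dict; no argument is mutated.

-- ===== PORT A =====
-- p[i] as total pyGetD: the Python raises IndexError for a point with fewer than 4
-- coordinates, which Pre_ excludes.
def pvManhattan (p1 p2 : List Int) : Int :=
  |PySem.List.pyGetD p2 0 0 - PySem.List.pyGetD p1 0 0| +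
  |PySem.List.pyGetD p2 1 0 - PySem.List.pyGetD p1 1 0| +
  |PySem.List.pyGetD p2 2 0 - PySem.List.pyGetD p1 2 0| +
  |PySem.List.pyGetD p2 3 0 - PySem.List.pyGetD p1 3 0|

def all_in_range_neighbours (points : List (List Int)) : List (List Int × List (List Int)) :=
  -- in_range = defaultdict(set); in_range[p].add(q) is Dict.modify with default Set.empty
  let in_range : PySem.Dict (List Int) (PySem.Set (List Int)) :=
    (PySem.List.combinations points 2).foldl
      (fun d c =>
        if pvManhattan (PySem.List.pyGetD c 0 []) (PySem.List.pyGetD c 1 []) ≤ 3 then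
          PySem.Dict.modify
            (PySem.Dict.modify d (PySem.List.pyGetD c 0 []) PySem.Set.empty
              (fun s => PySem.Set.add s (PySem.List.pyGetD c 1 [])))
            (PySem.List.pyGetD c 1 []) PySem.Set.empty
            (fun s => PySem.Set.add s (PySem.List.pyGetD c 0 []))
        else d)
      PySem.Dict.empty
  ((points.filter (fun p => !(PySem.Dict.contains in_range p))).foldl
      (fun d p => PySem.Dict.insert d p PySem.Set.empty) in_range).items

-- ===== PORT B =====
-- _cell(p) = (p[0]//4, p[1]//4, p[2]//4, p[3]//4); pyGetD is the total form of p[i]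
-- (Python raises IndexError for a short point, outside Pre_)
def pvCell (p : List Int) : Int × Int × Int × Int :=
  (PySem.Int.floordiv (PySem.List.pyGetD p 0 0) 4,
   PySem.Int.floordiv (PySem.List.pyGetD p 1 0) 4,
   PySem.Int.floordiv (PySem.List.pyGetD p 2 0) 4,
   PySem.Int.floordiv (PySem.List.pyGetD p 3 0) 4)

-- grid = defaultdict(list); grid[_cell(p)].append(i)
def pvGrid (pts : List (List Int)) : PySem.Dict (Int × Int × Int × Int) (List Int) :=
  (PySem.List.enumerate pts 0).foldl
    (fun g ip => PySem.Dict.modify g (pvCell ip.2) [] (fun l => l ++ [ip.1]))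
    PySem.Dict.empty

-- offs = (-1, 0, 1)
def pvOffs : List Int := [-1, 0, 1]

-- the generator (j for a in offs … for j in grid.get((x+a, y+b, z+c, t+d), ()))
def pvCand (grid : PySem.Dict (Int × Int × Int × Int) (List Int)) (c : Int × Int × Int × Int) : List Int :=
  pvOffs.flatMap (fun a =>
    pvOffs.flatMap (fun b =>
      pvOffs.flatMap (fun cc =>
        pvOffs.flatMap (fun dd =>
          PySem.Dict.getD grid (c.1 + a, c.2.1 + b, c.2.2.1 + cc, c.2.2.2 + dd) []))))

def all_in_range_neighbours_alt (points : List (List Int)) : List (List Int × List (List Int)) :=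
  let pts := points
  let grid := pvGrid pts
  let in_range : PySem.Dict (List Int) (PySem.Set (List Int)) :=
    (PySem.List.enumerate pts 0).foldl
      (fun d ip =>
        (PySem.List.sorted (pvCand grid (pvCell ip.2)) (fun k => k) false).foldl
          (fun d j =>
            if ip.1 < j then
              if |PySem.List.pyGetD (PySem.List.pyGetD pts j []) 0 0 - PySem.List.pyGetD ip.2 0 0| +
                 |PySem.List.pyGetD (PySem.List.pyGetD pts j []) 1 0 - PySem.List.pyGetD ip.2 1 0| +
                 |PySem.List.pyGetD (PySem.List.pyGetD pts j []) 2 0 - PySem.List.pyGetD ip.2 2 0| +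
                 |PySem.List.pyGetD (PySem.List.pyGetD pts j []) 3 0 - PySem.List.pyGetD ip.2 3 0| ≤ 3 then
                PySem.Dict.modify
                  (PySem.Dict.modify d ip.2 PySem.Set.empty
                    (fun s => PySem.Set.add s (PySem.List.pyGetD pts j [])))
                  (PySem.List.pyGetD pts j []) PySem.Set.empty
                  (fun s => PySem.Set.add s ip.2)
              else d
            else d)
          d)
      PySem.Dict.empty
  (pts.foldl
      (fun d p => if PySem.Dict.contains d p then d else PySem.Dict.insert d p PySem.Set.empty)
      in_range).items

-- ===== PRECONDITION & SPEC =====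
-- Pre_ excludes inputs containing a point with fewer than 4 coordinates: with ≥ 2 points A
-- raises IndexError there (and B raises too), while with ≤ 1 point A happens to return
-- without ever reading coordinates but B (which always hashes every point into the grid)
-- raises IndexError, so those inputs are excluded as well.
def Pre_all_in_range_neighbours (points : List (List Int)) : Prop :=
  ∀ p ∈ points, 4 ≤ p.length
instance (points : List (List Int)) : Decidable (Pre_all_in_range_neighbours points) := by
  unfold Pre_all_in_range_neighbours; infer_instance
def pvWitness_all_in_range_neighbours : List (List Int) := [[0,0,0,0],[1,0,0,0]]

def Spec_all_in_range_neighbours (points : List (List Int)) (out : List (List Int × List (List Int))) : Prop := out = all_in_range_neighbours_alt points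
instance (points : List (List Int)) (out : List (List Int × List (List Int))) : Decidable (Spec_all_in_range_neighbours points out) := by unfold Spec_all_in_range_neighbours; infer_instance

-- ===== CLAIM (what is proved, stated in full; the proofs are below) =====
def Claim_equal_all_in_range_neighbours : Prop := ∀ (points : List (List Int)), Dom_all_in_range_neighbours points → Pre_all_in_range_neighbours points → Spec_all_in_range_neighbours points (all_in_range_neighbours points)

-- ===== LEMMAS AND PROOFS =====

-- ---- proof-side vocabulary ----

-- the index pairs (i, j), i < j < n, in the order combinations(points, 2) visits them
def pvIpairs : Nat → List (Nat × Nat)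
  | 0 => []
  | Nat.succ m =>
      (List.range m).map (fun j => (0, j + 1)) ++ (pvIpairs m).map (fun p => (p.1 + 1, p.2 + 1))

-- the qualifying pairs, in that order
def pvT (pts : List (List Int)) : List (Nat × Nat) :=
  (pvIpairs pts.length).filter
    (fun p => decide (pvManhattan (pts.getD p.1 []) (pts.getD p.2 []) ≤ 3))

-- one symmetric adjacency update of the dict
def pvStep (pts : List (List Int)) (d : PySem.Dict (List Int) (PySem.Set (List Int)))
    (i j : Nat) : PySem.Dict (List Int) (PySem.Set (List Int)) :=
  PySem.Dict.modify
    (PySem.Dict.modify d (pts.getD i []) PySem.Set.empty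
      (fun s => PySem.Set.add s (pts.getD j [])))
    (pts.getD j []) PySem.Set.empty
    (fun s => PySem.Set.add s (pts.getD i []))

def pvInRange (pts : List (List Int)) : PySem.Dict (List Int) (PySem.Set (List Int)) :=
  (pvT pts).foldl (fun d p => pvStep pts d p.1 p.2) PySem.Dict.empty

theorem pv_range_map_getD {α β : Type} (xs : List α) (d : α) (g : α → β) :
    (List.range xs.length).map (fun j => g (xs.getD j d)) = xs.map g := by
  induction xs with
  | nil => simp
  | cons x xs ih =>
    rw [List.length_cons, List.range_succ_eq_map, List.map_cons, List.map_map]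
    have h2 : (List.range xs.length).map ((fun j => g ((x :: xs).getD j d)) ∘ Nat.succ)
        = (List.range xs.length).map (fun j => g (xs.getD j d)) := by
      apply List.map_congr_left
      intro a _
      simp
    rw [h2, ih]
    simp


theorem pv_mem_ipairs (n : Nat) (p : Nat × Nat) : p ∈ pvIpairs n ↔ p.1 < p.2 ∧ p.2 < n := by
  induction n generalizing p with
  | zero => simp [pvIpairs]
  | succ m ih =>
    simp only [pvIpairs, List.mem_append, List.mem_map, List.mem_range, ih]
    constructor
    · rintro (⟨j, hj, rfl⟩ | ⟨q, ⟨hq1, hq2⟩, rfl⟩) <;> simp <;> omega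
    · rintro ⟨h1, h2⟩
      rcases p with ⟨i, j⟩
      simp only at h1 h2 ⊢
      cases i with
      | zero => exact Or.inl ⟨j - 1, by omega, by simp; omega⟩
      | succ i' => exact Or.inr ⟨(i', j - 1), ⟨by omega, by omega⟩, by simp; omega⟩

theorem pv_ipairs_code_pairwise (n : Nat) (N : Int) (hN : (n : Int) ≤ N) :
    (pvIpairs n).Pairwise (fun p q => (p.1 : Int) * N + p.2 < (q.1 : Int) * N + q.2) := by
  induction n generalizing N with
  | zero => simp [pvIpairs]
  | succ m ih =>
    have hm : (m : Int) ≤ N := by push_cast at hN ⊢; omega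
    have hN0 : 0 ≤ N := le_trans (by positivity) hm
    rw [pvIpairs, List.pairwise_append]
    refine ⟨?_, ?_, ?_⟩
    · rw [List.pairwise_map]
      refine List.Pairwise.imp ?_ (List.pairwise_lt_range)
      intro a b hab
      omega
    · rw [List.pairwise_map]
      refine List.Pairwise.imp ?_ (ih N hm)
      intro a b hab
      push_cast
      push_cast at hab
      nlinarith
    · intro a ha b hb
      simp only [List.mem_map, List.mem_range] at ha hb
      obtain ⟨j, hj, rfl⟩ := ha
      obtain ⟨q, hq, rfl⟩ := hb
      push_cast
      have h1 : (1 : Int) * N ≤ ((q.1 : Int) + 1) * N := by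
        apply mul_le_mul_of_nonneg_right _ hN0
        push_cast; omega
      push_cast at hN
      nlinarith

theorem pv_combinations_two (points : List (List Int)) :
    PySem.List.combinations points 2 =
      (pvIpairs points.length).map (fun p => [points.getD p.1 [], points.getD p.2 []]) := by
  induction points with
  | nil => simp [pvIpairs, PySem.List.combinations_nil_succ]
  | cons x xs ih =>
    rw [show (2 : Nat) = 1 + 1 from rfl, PySem.List.combinations_cons_succ,
        PySem.List.combinations_one, List.length_cons]
    simp only [pvIpairs, List.map_append, List.map_map]
    congr 1
    · have hL : List.map ((fun c => x :: c) ∘ fun y => [y]) xs = xs.map (fun y => [x, y]) := by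
        simp
      rw [hL, ← pv_range_map_getD xs [] (fun y => [x, y])]
      apply List.map_congr_left
      intro j _
      simp

-- ---- A's dict is the fold of pvStep over pvT ----
theorem pv_A_dict (pts : List (List Int)) :
    (PySem.List.combinations pts 2).foldl
      (fun d c =>
        if pvManhattan (PySem.List.pyGetD c 0 []) (PySem.List.pyGetD c 1 []) ≤ 3 then
          PySem.Dict.modify
            (PySem.Dict.modify d (PySem.List.pyGetD c 0 []) PySem.Set.empty
              (fun s => PySem.Set.add s (PySem.List.pyGetD c 1 [])))
            (PySem.List.pyGetD c 1 []) PySem.Set.empty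
            (fun s => PySem.Set.add s (PySem.List.pyGetD c 0 []))
        else d)
      PySem.Dict.empty = pvInRange pts := by
  rw [PySem.List.foldl_ite_eq_foldl_filter
    (p := fun c => pvManhattan (PySem.List.pyGetD c 0 []) (PySem.List.pyGetD c 1 []) ≤ 3)]
  rw [pv_combinations_two, List.filter_map]
  have hfc : (pvIpairs pts.length).filter
        ((fun c => decide (pvManhattan (PySem.List.pyGetD c 0 []) (PySem.List.pyGetD c 1 []) ≤ 3)) ∘
          (fun p => [pts.getD p.1 [], pts.getD p.2 []])) =
      (pvIpairs pts.length).filter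
        (fun p => decide (pvManhattan (pts.getD p.1 []) (pts.getD p.2 []) ≤ 3)) := by
    apply List.filter_congr
    intro p _
    simp [PySem.List.pyGetD_ofNat']
  rw [hfc, List.foldl_map]
  rfl

-- ---- the grid buckets ----
theorem pv_bucket (pts : List (List Int)) (key : Int × Int × Int × Int) :
    (pvGrid pts).getD key [] =
      ((PySem.List.enumerate pts 0).filter (fun ip => pvCell ip.2 == key)).map (fun ip => ip.1) := by
  have h := PySem.Dict.getD_foldl_modify_append
      ((PySem.List.enumerate pts 0).map (fun ip => (pvCell ip.2, ip.1))) PySem.Dict.empty key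
  rw [List.foldl_map] at h
  simpa [pvGrid, List.filter_map, Function.comp] using h

theorem pv_mem_bucket (pts : List (List Int)) (key : Int × Int × Int × Int) (j : Int) :
    j ∈ (pvGrid pts).getD key [] ↔
      ∃ (m : Nat) (h : m < pts.length), j = (m : Int) ∧ pvCell pts[m] = key := by
  rw [pv_bucket]
  simp only [List.mem_map, List.mem_filter, PySem.List.mem_enumerate_iff, beq_iff_eq]
  constructor
  · rintro ⟨ip, ⟨⟨m, hm, rfl⟩, hc⟩, rfl⟩
    exact ⟨m, hm, by simp, by simpa using hc⟩
  · rintro ⟨m, hm, rfl, hc⟩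
    exact ⟨((m : Int), pts[m]), ⟨⟨m, hm, by simp⟩, by simpa using hc⟩, rfl⟩

theorem pv_bucket_pairwise (pts : List (List Int)) (key : Int × Int × Int × Int) :
    ((pvGrid pts).getD key []).Pairwise (· < ·) := by
  rw [pv_bucket, List.pairwise_map]
  exact List.Pairwise.filter _ (PySem.List.pairwise_lt_enumerate pts 0)

-- ---- the candidate list ----
def pvOffs4 : List (Int × Int × Int × Int) :=
  pvOffs.flatMap (fun a =>
    pvOffs.flatMap (fun b =>
      pvOffs.flatMap (fun cc =>
        pvOffs.map (fun dd => (a, b, cc, dd)))))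

theorem pv_cand_flat (grid : PySem.Dict (Int × Int × Int × Int) (List Int)) (c : Int × Int × Int × Int) :
    pvCand grid c =
      pvOffs4.flatMap (fun o =>
        PySem.Dict.getD grid (c.1 + o.1, c.2.1 + o.2.1, c.2.2.1 + o.2.2.1, c.2.2.2 + o.2.2.2) []) := by
  simp only [pvCand, pvOffs4, List.flatMap_assoc, List.flatMap_map]

theorem pv_cand_nodup (pts : List (List Int)) (c : Int × Int × Int × Int) :
    (pvCand (pvGrid pts) c).Nodup := by
  rw [pv_cand_flat, List.nodup_flatMap]
  constructor
  · intro o _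
    exact List.Pairwise.imp ne_of_lt (pv_bucket_pairwise pts _)
  · have hnd : pvOffs4.Nodup := by decide
    refine List.Pairwise.imp ?_ hnd
    intro o o' hne j hj1 hj2
    rw [pv_mem_bucket] at hj1 hj2
    obtain ⟨m, hm, rfl, hc1⟩ := hj1
    obtain ⟨m', hm', hmm, hc2⟩ := hj2
    have : m = m' := by exact_mod_cast hmm
    subst this
    rw [hc1] at hc2
    apply hne
    obtain ⟨a, b, cc, dd⟩ := o
    obtain ⟨a', b', cc', dd'⟩ := o'
    simp only [Prod.mk.injEq] at hc2 ⊢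
    omega

theorem pv_mem_cand (pts : List (List Int)) (c : Int × Int × Int × Int) (j : Int) :
    j ∈ pvCand (pvGrid pts) c ↔
      ∃ (m : Nat) (h : m < pts.length), j = (m : Int) ∧
        (-1 ≤ (pvCell pts[m]).1 - c.1 ∧ (pvCell pts[m]).1 - c.1 ≤ 1) ∧
        (-1 ≤ (pvCell pts[m]).2.1 - c.2.1 ∧ (pvCell pts[m]).2.1 - c.2.1 ≤ 1) ∧
        (-1 ≤ (pvCell pts[m]).2.2.1 - c.2.2.1 ∧ (pvCell pts[m]).2.2.1 - c.2.2.1 ≤ 1) ∧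
        (-1 ≤ (pvCell pts[m]).2.2.2 - c.2.2.2 ∧ (pvCell pts[m]).2.2.2 - c.2.2.2 ≤ 1) := by
  unfold pvCand
  simp only [List.mem_flatMap, pv_mem_bucket]
  constructor
  · rintro ⟨a, ha, b, hb, cc, hcc, dd, hdd, m, hm, rfl, hcell⟩
    simp only [pvOffs, List.mem_cons, List.not_mem_nil, or_false] at ha hb hcc hdd
    refine ⟨m, hm, rfl, ?_, ?_, ?_, ?_⟩ <;> rw [hcell] <;> simp <;> omega
  · rintro ⟨m, hm, rfl, h1, h2, h3, h4⟩
    refine ⟨(pvCell pts[m]).1 - c.1, by simp [pvOffs]; omega,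
            (pvCell pts[m]).2.1 - c.2.1, by simp [pvOffs]; omega,
            (pvCell pts[m]).2.2.1 - c.2.2.1, by simp [pvOffs]; omega,
            (pvCell pts[m]).2.2.2 - c.2.2.2, by simp [pvOffs]; omega,
            m, hm, rfl, ?_⟩
    have e1 : c.1 + ((pvCell pts[m]).1 - c.1) = (pvCell pts[m]).1 := by ring
    have e2 : c.2.1 + ((pvCell pts[m]).2.1 - c.2.1) = (pvCell pts[m]).2.1 := by ring
    have e3 : c.2.2.1 + ((pvCell pts[m]).2.2.1 - c.2.2.1) = (pvCell pts[m]).2.2.1 := by ring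
    have e4 : c.2.2.2 + ((pvCell pts[m]).2.2.2 - c.2.2.2) = (pvCell pts[m]).2.2.2 := by ring
    rw [e1, e2, e3, e4]

-- distance ≤ 3 in one coordinate puts the cells in the same or an adjacent slab
theorem pv_cell_adjacent {u v : Int} (h : |u - v| ≤ 3) :
    -1 ≤ PySem.Int.floordiv u 4 - PySem.Int.floordiv v 4 ∧
      PySem.Int.floordiv u 4 - PySem.Int.floordiv v 4 ≤ 1 := by
  rw [abs_le] at h
  rw [PySem.Int.floordiv_eq_ediv_of_pos (by norm_num), PySem.Int.floordiv_eq_ediv_of_pos (by norm_num)]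
  omega

-- ---- B's per-point group ----
def pvGroup (pts : List (List Int)) (ip : Int × List Int) : List Int :=
  ((List.range pts.length).filter
      (fun (m : Nat) => decide (ip.1 < (m : Int) ∧ pvManhattan ip.2 (pts.getD m []) ≤ 3))).map
    (fun (m : Nat) => (m : Int))

-- cell adjacency, as a Bool test on two cells
def pvAdjB (c c' : Int × Int × Int × Int) : Bool :=
  decide ((-1 ≤ c'.1 - c.1 ∧ c'.1 - c.1 ≤ 1) ∧
          (-1 ≤ c'.2.1 - c.2.1 ∧ c'.2.1 - c.2.1 ≤ 1) ∧
          (-1 ≤ c'.2.2.1 - c.2.2.1 ∧ c'.2.2.1 - c.2.2.1 ≤ 1) ∧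
          (-1 ≤ c'.2.2.2 - c.2.2.2 ∧ c'.2.2.2 - c.2.2.2 ≤ 1))

theorem pv_coord_le (p q : List Int) (h : pvManhattan p q ≤ 3) :
    |PySem.List.pyGetD q 0 0 - PySem.List.pyGetD p 0 0| ≤ 3 ∧
    |PySem.List.pyGetD q 1 0 - PySem.List.pyGetD p 1 0| ≤ 3 ∧
    |PySem.List.pyGetD q 2 0 - PySem.List.pyGetD p 2 0| ≤ 3 ∧
    |PySem.List.pyGetD q 3 0 - PySem.List.pyGetD p 3 0| ≤ 3 := by
  unfold pvManhattan at h
  have a0 := abs_nonneg (PySem.List.pyGetD q 0 0 - PySem.List.pyGetD p 0 0)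
  have a1 := abs_nonneg (PySem.List.pyGetD q 1 0 - PySem.List.pyGetD p 1 0)
  have a2 := abs_nonneg (PySem.List.pyGetD q 2 0 - PySem.List.pyGetD p 2 0)
  have a3 := abs_nonneg (PySem.List.pyGetD q 3 0 - PySem.List.pyGetD p 3 0)
  omega

theorem pv_adj_of_dist (p q : List Int) (h : pvManhattan p q ≤ 3) :
    pvAdjB (pvCell p) (pvCell q) = true := by
  obtain ⟨h0, h1, h2, h3⟩ := pv_coord_le p q h
  unfold pvAdjB pvCell
  simp only [decide_eq_true_eq]
  exact ⟨pv_cell_adjacent h0, pv_cell_adjacent h1, pv_cell_adjacent h2, pv_cell_adjacent h3⟩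

theorem pv_sorted_filter_cand (pts : List (List Int)) (k : Nat) (hk : k < pts.length) :
    (PySem.List.sorted (pvCand (pvGrid pts) (pvCell pts[k])) (fun x => x) false).filter
        (fun j => decide ((k : Int) < j ∧ pvManhattan pts[k] (PySem.List.pyGetD pts j []) ≤ 3))
      = pvGroup pts ((k : Int), pts[k]) := by
  have hys_pw : (((List.range pts.length).filter
      (fun m => pvAdjB (pvCell pts[k]) (pvCell (pts.getD m [])))).map (fun (m : Nat) => (m : Int))).Pairwise
      (fun a b => a < b) := by
    rw [List.pairwise_map]
    refine List.Pairwise.imp ?_ (List.Pairwise.filter _ List.pairwise_lt_range)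
    intro a b hab
    exact_mod_cast hab
  have hys_nodup : (((List.range pts.length).filter
      (fun m => pvAdjB (pvCell pts[k]) (pvCell (pts.getD m [])))).map (fun (m : Nat) => (m : Int))).Nodup :=
    hys_pw.imp (fun h => ne_of_lt h)
  have hmem : ∀ j : Int, (j ∈ ((List.range pts.length).filter
        (fun m => pvAdjB (pvCell pts[k]) (pvCell (pts.getD m [])))).map (fun (m : Nat) => (m : Int)))
      ↔ j ∈ pvCand (pvGrid pts) (pvCell pts[k]) := by
    intro j
    rw [pv_mem_cand]
    simp only [List.mem_map, List.mem_filter, List.mem_range, pvAdjB, decide_eq_true_eq]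
    constructor
    · rintro ⟨m, ⟨hm, hadj⟩, rfl⟩
      rw [List.getD_eq_getElem pts [] hm] at hadj
      exact ⟨m, hm, rfl, hadj.1, hadj.2.1, hadj.2.2.1, hadj.2.2.2⟩
    · rintro ⟨m, hm, rfl, h1, h2, h3, h4⟩
      refine ⟨m, ⟨hm, ?_⟩, rfl⟩
      rw [List.getD_eq_getElem pts [] hm]
      exact ⟨h1, h2, h3, h4⟩
  have hperm : (((List.range pts.length).filter
        (fun m => pvAdjB (pvCell pts[k]) (pvCell (pts.getD m [])))).map (fun (m : Nat) => (m : Int))).Perm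
      (pvCand (pvGrid pts) (pvCell pts[k])) :=
    List.perm_of_nodup_nodup_toFinset_eq hys_nodup (pv_cand_nodup pts _)
      (by ext a; simp only [List.mem_toFinset]; exact hmem a)
  rw [PySem.List.sorted_eq_of_perm_of_pairwise_lt _ _ (fun x => x) hperm hys_pw]
  rw [List.filter_map, List.filter_filter]
  unfold pvGroup
  congr 1
  apply List.filter_congr
  intro m hm
  simp only [List.mem_range] at hm
  simp only [Function.comp_apply, PySem.List.pyGetD_natCast]
  by_cases hd : pvManhattan pts[k] (pts.getD m []) ≤ 3
  · have hadj := pv_adj_of_dist pts[k] (pts.getD m []) hd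
    simp only [List.getD_eq_getElem?_getD] at hadj ⊢
    simp [hadj]
  · simp only [List.getD_eq_getElem?_getD] at hd ⊢
    simp [hd]

-- a loop inside a loop is one loop over the pairs
theorem pv_foldl_foldl {α β σ : Type} (l : List α) (g : α → List β) (F : α × β → σ → σ) (init : σ) :
    l.foldl (fun d a => (g a).foldl (fun d b => F (a, b) d) d) init
      = (l.flatMap (fun a => (g a).map (fun b => (a, b)))).foldl (fun d p => F p d) init := by
  induction l generalizing init with
  | nil => rfl
  | cons a l ih =>
    simp only [List.foldl_cons, List.flatMap_cons, List.foldl_append, List.foldl_map, ih]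

theorem pv_mem_group (pts : List (List Int)) (ip : Int × List Int) (x : Int) :
    x ∈ pvGroup pts ip ↔
      ∃ m : Nat, m < pts.length ∧ x = (m : Int) ∧ ip.1 < x ∧
        pvManhattan ip.2 (pts.getD m []) ≤ 3 := by
  unfold pvGroup
  simp only [List.mem_map, List.mem_filter, List.mem_range, decide_eq_true_eq]
  constructor
  · rintro ⟨m, ⟨hm, h1, h2⟩, rfl⟩
    exact ⟨m, hm, rfl, h1, h2⟩
  · rintro ⟨m, hm, rfl, h1, h2⟩
    exact ⟨m, ⟨hm, h1, h2⟩, rfl⟩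

theorem pv_group_pairwise (pts : List (List Int)) (ip : Int × List Int) :
    (pvGroup pts ip).Pairwise (· < ·) := by
  unfold pvGroup
  rw [List.pairwise_map]
  refine List.Pairwise.imp ?_ (List.Pairwise.filter _ List.pairwise_lt_range)
  intro a b hab
  exact_mod_cast hab

-- the flattened grid traversal is exactly the qualifying-pair list
theorem pv_flat_eq (pts : List (List Int)) :
    (PySem.List.enumerate pts 0).flatMap (fun ip => (pvGroup pts ip).map (fun j => (ip, j)))
      = (pvT pts).map (fun p => (((p.1 : Int), pts.getD p.1 []), (p.2 : Int))) := by
  have hpw1 : ((PySem.List.enumerate pts 0).flatMap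
      (fun ip => (pvGroup pts ip).map (fun j => (ip, j)))).Pairwise
      (fun x y => x.1.1 * (pts.length : Int) + x.2 < y.1.1 * (pts.length : Int) + y.2) := by
    rw [List.pairwise_flatMap]
    constructor
    · intro ip _
      rw [List.pairwise_map]
      refine List.Pairwise.imp ?_ (pv_group_pairwise pts ip)
      intro a b hab
      simp only
      omega
    · refine List.Pairwise.imp ?_ (PySem.List.pairwise_lt_enumerate pts 0)
      intro ip ip' hlt x hx y hy
      simp only [List.mem_map] at hx hy
      obtain ⟨j, hj, rfl⟩ := hx
      obtain ⟨j', hj', rfl⟩ := hy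
      rw [pv_mem_group] at hj hj'
      obtain ⟨m, hm, rfl, -, -⟩ := hj
      obtain ⟨m', hm', rfl, -, -⟩ := hj'
      simp only
      have h1 : ip.1 + 1 ≤ ip'.1 := by omega
      have h2 : (ip.1 + 1) * (pts.length : Int) ≤ ip'.1 * (pts.length : Int) :=
        mul_le_mul_of_nonneg_right h1 (by positivity)
      have h3 : (m : Int) < (pts.length : Int) := by exact_mod_cast hm
      have h4 : (0 : Int) ≤ (m' : Int) := by positivity
      nlinarith
  have hpw2 : ((pvT pts).map (fun p => (((p.1 : Int), pts.getD p.1 []), (p.2 : Int)))).Pairwise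
      (fun x y => x.1.1 * (pts.length : Int) + x.2 < y.1.1 * (pts.length : Int) + y.2) := by
    rw [List.pairwise_map]
    refine List.Pairwise.imp ?_ (List.Pairwise.filter _ (pv_ipairs_code_pairwise pts.length pts.length le_rfl))
    intro a b hab
    exact hab
  have hnd1 : ((PySem.List.enumerate pts 0).flatMap
      (fun ip => (pvGroup pts ip).map (fun j => (ip, j)))).Nodup := by
    refine hpw1.imp ?_
    intro a b h he
    rw [he] at h
    exact lt_irrefl _ h
  have hnd2 : ((pvT pts).map (fun p => (((p.1 : Int), pts.getD p.1 []), (p.2 : Int)))).Nodup := by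
    refine hpw2.imp ?_
    intro a b h he
    rw [he] at h
    exact lt_irrefl _ h
  have hmem : ∀ x, (x ∈ (PySem.List.enumerate pts 0).flatMap
        (fun ip => (pvGroup pts ip).map (fun j => (ip, j))))
      ↔ x ∈ (pvT pts).map (fun p => (((p.1 : Int), pts.getD p.1 []), (p.2 : Int))) := by
    intro x
    simp only [List.mem_flatMap, List.mem_map, PySem.List.mem_enumerate_iff]
    unfold pvT
    simp only [List.mem_filter, pv_mem_ipairs, decide_eq_true_eq]
    constructor
    · rintro ⟨ip, ⟨k, hk, rfl⟩, j, hj, rfl⟩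
      rw [pv_mem_group] at hj
      obtain ⟨m, hm, rfl, hlt, hdist⟩ := hj
      have hlt' : (k : Int) < (m : Int) := by simpa using hlt
      have hkm : k < m := by exact_mod_cast hlt'
      have hdist' : pvManhattan (pts.getD k []) (pts.getD m []) ≤ 3 := by
        rw [List.getD_eq_getElem pts [] hk]
        simpa using hdist
      refine ⟨(k, m), ⟨⟨hkm, hm⟩, hdist'⟩, ?_⟩
      simp [List.getElem?_eq_getElem hk]
    · rintro ⟨⟨k, m⟩, ⟨⟨hkm, hm⟩, hdist⟩, rfl⟩
      have hk : k < pts.length := lt_trans hkm hm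
      refine ⟨((k : Int), pts[k]), ⟨k, hk, by simp⟩, (m : Int), ?_, ?_⟩
      · rw [pv_mem_group]
        refine ⟨m, hm, rfl, ?_, ?_⟩
        · show (k : Int) < (m : Int)
          exact_mod_cast hkm
        · show pvManhattan pts[k] (pts.getD m []) ≤ 3
          rw [← List.getD_eq_getElem pts [] hk]
          exact hdist
      · simp [List.getElem?_eq_getElem hk]
  refine List.Perm.eq_of_pairwise ?_ hpw1 hpw2 ?_
  · intro a b _ _ h1 h2
    exact absurd h2 (lt_asymm h1)
  · exact List.perm_of_nodup_nodup_toFinset_eq hnd1 hnd2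
      (by ext a; simp only [List.mem_toFinset]; exact hmem a)

def pvStepB (pts : List (List Int)) (p : (Int × List Int) × Int)
    (d : PySem.Dict (List Int) (PySem.Set (List Int))) :
    PySem.Dict (List Int) (PySem.Set (List Int)) :=
  PySem.Dict.modify
    (PySem.Dict.modify d p.1.2 PySem.Set.empty
      (fun s => PySem.Set.add s (PySem.List.pyGetD pts p.2 [])))
    (PySem.List.pyGetD pts p.2 []) PySem.Set.empty
    (fun s => PySem.Set.add s p.1.2)

theorem pv_inner (pts : List (List Int)) (k : Nat) (hk : k < pts.length)
    (d : PySem.Dict (List Int) (PySem.Set (List Int))) :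
    (PySem.List.sorted (pvCand (pvGrid pts) (pvCell pts[k])) (fun x => x) false).foldl
      (fun d j =>
        if (k : Int) < j then
          if pvManhattan pts[k] (PySem.List.pyGetD pts j []) ≤ 3 then
            PySem.Dict.modify
              (PySem.Dict.modify d pts[k] PySem.Set.empty
                (fun s => PySem.Set.add s (PySem.List.pyGetD pts j [])))
              (PySem.List.pyGetD pts j []) PySem.Set.empty
              (fun s => PySem.Set.add s pts[k])
          else d
        else d) d
    = (pvGroup pts ((k : Int), pts[k])).foldl
        (fun d j => pvStepB pts (((k : Int), pts[k]), j) d) d := by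
  have hpoint : ∀ j ∈ PySem.List.sorted (pvCand (pvGrid pts) (pvCell pts[k])) (fun x => x) false,
      ∀ acc : PySem.Dict (List Int) (PySem.Set (List Int)),
      (if (k : Int) < j then
        (if pvManhattan pts[k] (PySem.List.pyGetD pts j []) ≤ 3 then
          PySem.Dict.modify
            (PySem.Dict.modify acc pts[k] PySem.Set.empty
              (fun s => PySem.Set.add s (PySem.List.pyGetD pts j [])))
            (PySem.List.pyGetD pts j []) PySem.Set.empty
            (fun s => PySem.Set.add s pts[k])
        else acc)
      else acc)
      = (if ((k : Int) < j ∧ pvManhattan pts[k] (PySem.List.pyGetD pts j []) ≤ 3) then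
          pvStepB pts (((k : Int), pts[k]), j) acc
        else acc) := by
    intro j _ acc
    by_cases h1 : (k : Int) < j
    · by_cases h2 : pvManhattan pts[k] (PySem.List.pyGetD pts j []) ≤ 3
      · rw [if_pos h1, if_pos h2, if_pos ⟨h1, h2⟩]
        rfl
      · rw [if_pos h1, if_neg h2, if_neg (fun h => h2 h.2)]
    · rw [if_neg h1, if_neg (fun h => h1 h.1)]
  calc
    (PySem.List.sorted (pvCand (pvGrid pts) (pvCell pts[k])) (fun x => x) false).foldl
      (fun d j =>
        if (k : Int) < j then
          if pvManhattan pts[k] (PySem.List.pyGetD pts j []) ≤ 3 then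
            PySem.Dict.modify
              (PySem.Dict.modify d pts[k] PySem.Set.empty
                (fun s => PySem.Set.add s (PySem.List.pyGetD pts j [])))
              (PySem.List.pyGetD pts j []) PySem.Set.empty
              (fun s => PySem.Set.add s pts[k])
          else d
        else d) d
      = (PySem.List.sorted (pvCand (pvGrid pts) (pvCell pts[k])) (fun x => x) false).foldl
          (fun d j =>
            if ((k : Int) < j ∧ pvManhattan pts[k] (PySem.List.pyGetD pts j []) ≤ 3) then
              pvStepB pts (((k : Int), pts[k]), j) d
            else d) d := PySem.List.foldl_congr_mem' _ _ _ _ hpoint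
    _ = ((PySem.List.sorted (pvCand (pvGrid pts) (pvCell pts[k])) (fun x => x) false).filter
          (fun j => decide ((k : Int) < j ∧ pvManhattan pts[k] (PySem.List.pyGetD pts j []) ≤ 3))).foldl
          (fun d j => pvStepB pts (((k : Int), pts[k]), j) d) d :=
        PySem.List.foldl_ite_eq_foldl_filter
          (p := fun j => (k : Int) < j ∧ pvManhattan pts[k] (PySem.List.pyGetD pts j []) ≤ 3)
          (f := fun d j => pvStepB pts (((k : Int), pts[k]), j) d) _ _
    _ = (pvGroup pts ((k : Int), pts[k])).foldl
          (fun d j => pvStepB pts (((k : Int), pts[k]), j) d) d := by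
        rw [pv_sorted_filter_cand pts k hk]

-- ---- B's dict is the same fold ----
theorem pv_B_dict (pts : List (List Int)) :
    (PySem.List.enumerate pts 0).foldl
      (fun d ip =>
        (PySem.List.sorted (pvCand (pvGrid pts) (pvCell ip.2)) (fun k => k) false).foldl
          (fun d j =>
            if ip.1 < j then
              if |PySem.List.pyGetD (PySem.List.pyGetD pts j []) 0 0 - PySem.List.pyGetD ip.2 0 0| +
                 |PySem.List.pyGetD (PySem.List.pyGetD pts j []) 1 0 - PySem.List.pyGetD ip.2 1 0| +
                 |PySem.List.pyGetD (PySem.List.pyGetD pts j []) 2 0 - PySem.List.pyGetD ip.2 2 0| +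
                 |PySem.List.pyGetD (PySem.List.pyGetD pts j []) 3 0 - PySem.List.pyGetD ip.2 3 0| ≤ 3 then
                PySem.Dict.modify
                  (PySem.Dict.modify d ip.2 PySem.Set.empty
                    (fun s => PySem.Set.add s (PySem.List.pyGetD pts j [])))
                  (PySem.List.pyGetD pts j []) PySem.Set.empty
                  (fun s => PySem.Set.add s ip.2)
              else d
            else d)
          d)
      PySem.Dict.empty = pvInRange pts := by
  calc
    (PySem.List.enumerate pts 0).foldl
      (fun d ip =>
        (PySem.List.sorted (pvCand (pvGrid pts) (pvCell ip.2)) (fun k => k) false).foldl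
          (fun d j =>
            if ip.1 < j then
              if |PySem.List.pyGetD (PySem.List.pyGetD pts j []) 0 0 - PySem.List.pyGetD ip.2 0 0| +
                 |PySem.List.pyGetD (PySem.List.pyGetD pts j []) 1 0 - PySem.List.pyGetD ip.2 1 0| +
                 |PySem.List.pyGetD (PySem.List.pyGetD pts j []) 2 0 - PySem.List.pyGetD ip.2 2 0| +
                 |PySem.List.pyGetD (PySem.List.pyGetD pts j []) 3 0 - PySem.List.pyGetD ip.2 3 0| ≤ 3 then
                PySem.Dict.modify
                  (PySem.Dict.modify d ip.2 PySem.Set.empty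
                    (fun s => PySem.Set.add s (PySem.List.pyGetD pts j [])))
                  (PySem.List.pyGetD pts j []) PySem.Set.empty
                  (fun s => PySem.Set.add s ip.2)
              else d
            else d)
          d)
      PySem.Dict.empty
      = (PySem.List.enumerate pts 0).foldl
          (fun d ip => (pvGroup pts ip).foldl (fun d j => pvStepB pts (ip, j) d) d)
          PySem.Dict.empty := by
        apply PySem.List.foldl_congr_mem'
        intro ip hip d
        rw [PySem.List.mem_enumerate_iff] at hip
        obtain ⟨k, hk, rfl⟩ := hip
        simp only [zero_add]
        exact pv_inner pts k hk d
    _ = ((PySem.List.enumerate pts 0).flatMap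
          (fun ip => (pvGroup pts ip).map (fun j => (ip, j)))).foldl
          (fun d p => pvStepB pts p d) PySem.Dict.empty :=
        pv_foldl_foldl _ _ _ _
    _ = ((pvT pts).map (fun p => (((p.1 : Int), pts.getD p.1 []), (p.2 : Int)))).foldl
          (fun d p => pvStepB pts p d) PySem.Dict.empty := by
        rw [pv_flat_eq]
    _ = pvInRange pts := by
        rw [List.foldl_map]
        unfold pvInRange
        apply PySem.List.foldl_congr_mem'
        intro p _ acc
        unfold pvStepB pvStep
        simp only [PySem.List.pyGetD_natCast]

-- ---- the two closing loops agree ----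
theorem pv_insert_self (d : PySem.Dict (List Int) (PySem.Set (List Int))) (k : List Int)
    (v : PySem.Set (List Int)) (hnd : d.keys.Nodup) (h : d.get? k = some v) :
    d.insert k v = d := by
  apply PySem.Dict.ext
  have hc : d.contains k = true := by
    rw [PySem.Dict.contains_eq_isSome_get?, h]
    rfl
  rw [PySem.Dict.items_insert_of_contains d v hc]
  have heach : ∀ p ∈ d.items, (if (p.1 == k) = true then (k, v) else p) = p := by
    intro p hp
    by_cases hpk : p.1 = k
    · have hp' : (p.1, p.2) ∈ d.items := hp
      have hget : d.get? p.1 = some p.2 := PySem.Dict.get?_of_mem_items d hp' hnd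
      rw [hpk, h] at hget
      have hv : v = p.2 := by injection hget
      rw [if_pos (by simpa using hpk), hv, ← hpk]
    · simp [hpk]
  rw [List.map_congr_left heach]
  simp

theorem pv_nodup_keys_modify (d : PySem.Dict (List Int) (PySem.Set (List Int))) (k : List Int)
    (f : PySem.Set (List Int) → PySem.Set (List Int)) (h : d.keys.Nodup) :
    (d.modify k PySem.Set.empty f).keys.Nodup := by
  have := PySem.Dict.nodup_keys_foldl_modify_key [()] (fun _ => k) PySem.Set.empty
    (fun _ _ => f) d h
  simpa using this

theorem pv_nodup_keys_fold (pts : List (List Int)) (l : List (Nat × Nat)) :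
    ∀ (d : PySem.Dict (List Int) (PySem.Set (List Int))), d.keys.Nodup →
      (l.foldl (fun d p => pvStep pts d p.1 p.2) d).keys.Nodup := by
  induction l with
  | nil => intro d h; exact h
  | cons p l ih =>
    intro d h
    exact ih _ (pv_nodup_keys_modify _ _ _ (pv_nodup_keys_modify _ _ _ h))

theorem pv_nodup_keys_inRange (pts : List (List Int)) : (pvInRange pts).keys.Nodup := by
  unfold pvInRange
  exact pv_nodup_keys_fold pts _ _ PySem.Dict.nodup_keys_empty

theorem pv_close_aux (d : PySem.Dict (List Int) (PySem.Set (List Int))) (p : List Int)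
    (hdp : d.contains p = false) :
    ∀ (l : List (List Int)) (d2 : PySem.Dict (List Int) (PySem.Set (List Int))),
      d2.keys.Nodup → d2.get? p = some PySem.Set.empty →
      (l.filter (fun q => !(PySem.Dict.contains d q))).foldl
          (fun d q => PySem.Dict.insert d q PySem.Set.empty) d2
        = (l.filter (fun q => !((q == p) || PySem.Dict.contains d q))).foldl
            (fun d q => PySem.Dict.insert d q PySem.Set.empty) d2 := by
  intro l
  induction l with
  | nil => intro d2 _ _; rfl
  | cons q l ih =>
    intro d2 hnd2 hget
    by_cases hqp : q = p
    · subst hqp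
      have h1 : (q :: l).filter (fun r => !(PySem.Dict.contains d r))
          = q :: l.filter (fun r => !(PySem.Dict.contains d r)) := by simp [hdp]
      have h2 : (q :: l).filter (fun r => !((r == q) || PySem.Dict.contains d r))
          = l.filter (fun r => !((r == q) || PySem.Dict.contains d r)) := by simp
      rw [h1, h2, List.foldl_cons, pv_insert_self d2 q PySem.Set.empty hnd2 hget]
      exact ih d2 hnd2 hget
    · have hbeq : (q == p) = false := by simpa using hqp
      by_cases hdq : PySem.Dict.contains d q = true
      · have h1 : (q :: l).filter (fun r => !(PySem.Dict.contains d r))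
            = l.filter (fun r => !(PySem.Dict.contains d r)) := by simp [hdq]
        have h2 : (q :: l).filter (fun r => !((r == p) || PySem.Dict.contains d r))
            = l.filter (fun r => !((r == p) || PySem.Dict.contains d r)) := by simp [hdq]
        rw [h1, h2]
        exact ih d2 hnd2 hget
      · have hdq' : PySem.Dict.contains d q = false := by simpa using hdq
        have h1 : (q :: l).filter (fun r => !(PySem.Dict.contains d r))
            = q :: l.filter (fun r => !(PySem.Dict.contains d r)) := by simp [hdq']
        have h2 : (q :: l).filter (fun r => !((r == p) || PySem.Dict.contains d r))
            = q :: l.filter (fun r => !((r == p) || PySem.Dict.contains d r)) := by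
          simp [hdq', hbeq]
        rw [h1, h2, List.foldl_cons, List.foldl_cons]
        exact ih (d2.insert q PySem.Set.empty)
          (PySem.Dict.nodup_keys_insert d2 q PySem.Set.empty hnd2)
          (by rw [PySem.Dict.get?_insert_of_ne d2 PySem.Set.empty (Ne.symm hqp)]; exact hget)

theorem pv_close_loops (l : List (List Int)) (d : PySem.Dict (List Int) (PySem.Set (List Int)))
    (hnd : d.keys.Nodup) :
    (l.filter (fun p => !(PySem.Dict.contains d p))).foldl
        (fun d p => PySem.Dict.insert d p PySem.Set.empty) d
      = l.foldl (fun d p => if PySem.Dict.contains d p then d else PySem.Dict.insert d p PySem.Set.empty) d := by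
  induction l generalizing d with
  | nil => rfl
  | cons q l ih =>
    by_cases h : PySem.Dict.contains d q = true
    · have h1 : (q :: l).filter (fun p => !(PySem.Dict.contains d p))
          = l.filter (fun p => !(PySem.Dict.contains d p)) := by simp [h]
      rw [h1, List.foldl_cons, if_pos h]
      exact ih d hnd
    · have h' : PySem.Dict.contains d q = false := by simpa using h
      have h1 : (q :: l).filter (fun p => !(PySem.Dict.contains d p))
          = q :: l.filter (fun p => !(PySem.Dict.contains d p)) := by simp [h']
      rw [h1, List.foldl_cons, List.foldl_cons, if_neg h]
      rw [← ih (d.insert q PySem.Set.empty) (PySem.Dict.nodup_keys_insert d q PySem.Set.empty hnd)]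
      have hfil : l.filter (fun r => !(PySem.Dict.contains (d.insert q PySem.Set.empty) r))
          = l.filter (fun r => !((r == q) || PySem.Dict.contains d r)) := by
        apply List.filter_congr
        intro r _
        rw [PySem.Dict.contains_insert]
      rw [hfil]
      exact pv_close_aux d q (by simpa using h) l (d.insert q PySem.Set.empty)
        (PySem.Dict.nodup_keys_insert d q PySem.Set.empty hnd)
        (PySem.Dict.get?_insert_self d q PySem.Set.empty)

-- ===== VERDICT (by name: the statement is the Claim_ definition above) =====
theorem all_in_range_neighbours_spec : Claim_equal_all_in_range_neighbours := by
  intro points _ _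
  unfold Spec_all_in_range_neighbours
  show all_in_range_neighbours points = all_in_range_neighbours_alt points
  simp only [all_in_range_neighbours, all_in_range_neighbours_alt]
  rw [pv_A_dict points, pv_B_dict points, pv_close_loops points _ (pv_nodup_keys_inRange points)]
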